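-- pv_equiv track=rewrite | github.com/influxdata/sedg | tests/test_wizard.py | _mock_editor_adds_closedate
-- ===== SOURCE A (Python) =====
-- def _mock_editor_adds_closedate(content, suffix=".cve"):
--     assert suffix  # for pyright
--     # Add CloseDate to the CVE content
--     lines = content.split("\n")
--     for i, line in enumerate(lines):
--         if line.startswith("CloseDate:"):
--             lines[i] = "CloseDate: 2025-06-24"
--             break
--     return "\n".join(lines)
-- ===== SOURCE B (Python) =====
-- def _mock_editor_adds_closedate(content, suffix=".cve"):
--     assert suffix  # for pyright
--     # Single left-to-right scan: at each line start, test for the marker;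
--     # on the first hit splice in the replacement up to the next "\n".
--     repl = "CloseDate: 2025-06-24"
--     at_start = True
--     i = 0
--     n = len(content)
--     while i < n:
--         if at_start and content.startswith("CloseDate:", i):
--             j = content.find("\n", i)
--             if j == -1:
--                 j = n
--             return content[:i] + repl + content[j:]
--         at_start = content[i] == "\n"
--         i += 1
--     return content
-- ===== Notes on version B (the rewrite author's own statement) =====
-- stated objective: alternative
-- what changed: B replaces A's split-into-lines / indexed loop with break / join pipeline by a single left-to-right scan over the string that tracks line starts and splices the replacement in at the first 'CloseDate:' line, never materialising a list of lines.
import Mathlib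
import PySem

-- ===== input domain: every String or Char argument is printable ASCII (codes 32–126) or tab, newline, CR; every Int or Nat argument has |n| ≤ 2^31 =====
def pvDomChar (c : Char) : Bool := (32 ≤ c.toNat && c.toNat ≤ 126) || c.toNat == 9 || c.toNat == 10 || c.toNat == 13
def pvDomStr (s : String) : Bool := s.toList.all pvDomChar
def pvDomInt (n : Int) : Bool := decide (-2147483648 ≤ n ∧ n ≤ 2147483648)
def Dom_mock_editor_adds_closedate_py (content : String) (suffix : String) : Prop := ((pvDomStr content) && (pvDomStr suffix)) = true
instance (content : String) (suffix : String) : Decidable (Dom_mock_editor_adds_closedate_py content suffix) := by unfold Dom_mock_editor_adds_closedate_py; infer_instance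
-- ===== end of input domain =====

-- B replaces A's split-lines/loop/join with a single left-to-right scan over the
-- characters that splices the replacement in at the first line start matching
-- "CloseDate:" (objective: alternative).


-- ===== PORT A =====
def pvPat : List Char := "CloseDate:".toList
def pvRepl : List Char := "CloseDate: 2025-06-24".toList

-- A's for-loop with break: scan the lines, replace the first one that starts
-- with "CloseDate:", keep the rest untouched.
def pvLoopA : List (List Char) → List (List Char)
  | [] => []
  | l :: ls =>
    if PySem.Chars.startswith l pvPat then pvRepl :: ls
    else l :: pvLoopA ls

-- content.split("\n") / "\n".join(...) are ported as List.splitOn '\n' /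
-- List.intercalate ['\n'] on the char list — exact for a single-char separator.
def mock_editor_adds_closedate_py (content : String) (suffix : String) : String :=
  String.mk (List.intercalate ['\n'] (pvLoopA (content.toList.splitOn '\n')))

-- ===== PORT B =====
-- B's while-loop: one pass, `atStart` tracks being at a line start; on the first
-- match emit the replacement and the rest of the string from the next '\n'
-- (content.find("\n", i) ported as dropWhile), else copy the char and move on.
def pvScan : Bool → List Char → List Char
  | _, [] => []
  | atStart, c :: cs =>
    if atStart && PySem.Chars.startswith (c :: cs) pvPat then
      pvRepl ++ (c :: cs).dropWhile (fun d => d != '\n')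
    else
      c :: pvScan (c == '\n') cs

def mock_editor_adds_closedate_py_alt (content : String) (suffix : String) : String :=
  String.mk (pvScan true content.toList)

-- ===== PRECONDITION & SPEC =====
-- `assert suffix` raises AssertionError on the empty string; both programs keep
-- the assert, so suffix = "" is excluded.
def Pre_mock_editor_adds_closedate_py (content : String) (suffix : String) : Prop := suffix ≠ ""
instance (content : String) (suffix : String) : Decidable (Pre_mock_editor_adds_closedate_py content suffix) := by unfold Pre_mock_editor_adds_closedate_py; infer_instance
def pvWitness_mock_editor_adds_closedate_py : String × String := ("CloseDate: TBD\nfoo", ".cve")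

def Spec_mock_editor_adds_closedate_py (content : String) (suffix : String) (out : String) : Prop := out = mock_editor_adds_closedate_py_alt content suffix
instance (content : String) (suffix : String) (out : String) : Decidable (Spec_mock_editor_adds_closedate_py content suffix out) := by unfold Spec_mock_editor_adds_closedate_py; infer_instance

-- ===== CLAIM (what is proved, stated in full; the proofs are below) =====
def Claim_equal_mock_editor_adds_closedate_py : Prop := ∀ (content : String) (suffix : String), Dom_mock_editor_adds_closedate_py content suffix → Pre_mock_editor_adds_closedate_py content suffix → Spec_mock_editor_adds_closedate_py content suffix (mock_editor_adds_closedate_py content suffix)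

-- ===== LEMMAS AND PROOFS =====

lemma pv_pat_no_nl : ∀ a ∈ pvPat, a ≠ '\n' := by
  have h : pvPat.all (fun a => a != '\n') = true := rfl
  intro a ha
  simpa using List.all_eq_true.mp h a ha

lemma pv_prefix_takeWhile_of (p : List Char) (hp : ∀ a ∈ p, a ≠ '\n') :
    ∀ cs : List Char, p <+: cs → p <+: cs.takeWhile (fun d => d != '\n') := by
  induction p with
  | nil => intro cs _; exact List.nil_prefix
  | cons a p ih =>
    intro cs hpre
    cases cs with
    | nil => simp at hpre
    | cons b cs =>
      rw [List.cons_prefix_cons] at hpre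
      obtain ⟨rfl, h2⟩ := hpre
      have ha : (a != '\n') = true := by simp [hp a (by simp)]
      simp only [List.takeWhile_cons, ha, if_true, List.cons_prefix_cons]
      exact ⟨by trivial, ih (fun x hx => hp x (by simp [hx])) cs h2⟩

lemma pv_sw_takeWhile (cs : List Char) :
    PySem.Chars.startswith (cs.takeWhile (fun d => d != '\n')) pvPat
      = PySem.Chars.startswith cs pvPat := by
  rw [Bool.eq_iff_iff, PySem.Chars.startswith_iff, PySem.Chars.startswith_iff]
  exact ⟨fun h => h.trans (List.takeWhile_prefix _),
         fun h => pv_prefix_takeWhile_of _ pv_pat_no_nl _ h⟩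

lemma pv_dropWhile_head : ∀ (cs : List Char) (x : Char) (rest : List Char),
    cs.dropWhile (fun d => d != '\n') = x :: rest → x = '\n' := by
  intro cs
  induction cs with
  | nil => intro x rest h; simp at h
  | cons c cs ih =>
    intro x rest h
    by_cases hc : c = '\n'
    · subst hc
      rw [List.dropWhile_cons_of_neg (by simp)] at h
      cases h; rfl
    · rw [List.dropWhile_cons_of_pos (by simp [hc])] at h
      exact ih _ _ h

lemma pvScan_false : ∀ cs : List Char, pvScan false cs =
    cs.takeWhile (fun d => d != '\n') ++
      (match cs.dropWhile (fun d => d != '\n') with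
       | [] => []
       | _ :: rest => '\n' :: pvScan true rest) := by
  intro cs
  induction cs with
  | nil => simp [pvScan]
  | cons c cs ih =>
    by_cases hc : c = '\n'
    · subst hc
      simp [pvScan, List.takeWhile_cons, List.dropWhile_cons]
    · have hc' : (c != '\n') = true := by simp [hc]
      have hcc : (c == '\n') = false := by simp [hc]
      simp [pvScan, hc', hcc, ih]

set_option maxRecDepth 8192 in
lemma pvScan_true (cs : List Char) : pvScan true cs =
    if PySem.Chars.startswith cs pvPat then
      pvRepl ++ cs.dropWhile (fun d => d != '\n')
    else
      cs.takeWhile (fun d => d != '\n') ++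
        (match cs.dropWhile (fun d => d != '\n') with
         | [] => []
         | _ :: rest => '\n' :: pvScan true rest) := by
  cases cs with
  | nil => simp [pvScan]; decide
  | cons c cs =>
    by_cases hsw : PySem.Chars.startswith (c :: cs) pvPat = true
    · simp [pvScan, hsw]
    · rw [if_neg hsw]
      by_cases hc : c = '\n'
      · subst hc
        simp [pvScan, hsw, List.takeWhile_cons, List.dropWhile_cons]
      · have hc' : (c != '\n') = true := by simp [hc]
        have hcc : (c == '\n') = false := by simp [hc]
        simp [pvScan, hsw, hc', hcc, pvScan_false]

lemma pv_splitOn (cs : List Char) : cs.splitOn '\n' =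
    cs.takeWhile (fun d => d != '\n') ::
      (match cs.dropWhile (fun d => d != '\n') with
       | [] => []
       | _ :: rest => rest.splitOn '\n') := by
  induction cs with
  | nil => simp [List.splitOn, List.splitOnP_nil]
  | cons c cs ih =>
    by_cases hc : c = '\n'
    · subst hc
      simp [List.splitOn, List.splitOnP_cons, List.takeWhile_cons, List.dropWhile_cons]
    · have hc' : (c != '\n') = true := by simp [hc]
      simp only [List.splitOn] at ih ⊢
      rw [List.splitOnP_cons]
      simp [hc, hc', ih, List.takeWhile_cons, List.dropWhile_cons]

lemma pv_splitOn_ne_nil (cs : List Char) : cs.splitOn '\n' ≠ [] :=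
  List.splitOnP_ne_nil _ _

lemma pv_ic_singleton (l : List Char) : List.intercalate ['\n'] [l] = l := by
  simp [List.intercalate]

lemma pv_ic_cons_cons (l l2 : List Char) (ls2 : List (List Char)) :
    List.intercalate ['\n'] (l :: l2 :: ls2)
      = l ++ '\n' :: List.intercalate ['\n'] (l2 :: ls2) := by
  simp [List.intercalate]

lemma pvLoopA_ne_nil (ls : List (List Char)) (h : ls ≠ []) : pvLoopA ls ≠ [] := by
  cases ls with
  | nil => exact absurd rfl h
  | cons l ls => simp only [pvLoopA]; split <;> simp

set_option maxRecDepth 8192 in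
lemma pv_main : ∀ (n : Nat) (cs : List Char), cs.length ≤ n →
    List.intercalate ['\n'] (pvLoopA (cs.splitOn '\n')) = pvScan true cs := by
  intro n
  induction n with
  | zero =>
    intro cs h
    have hcs : cs = [] := List.eq_nil_of_length_eq_zero (Nat.le_zero.mp h)
    subst hcs; decide
  | succ n ih =>
    intro cs hlen
    rw [pv_splitOn, pvScan_true]
    by_cases hsw : PySem.Chars.startswith cs pvPat = true
    · have hswt : PySem.Chars.startswith (cs.takeWhile (fun d => d != '\n')) pvPat = true := by
        rw [pv_sw_takeWhile]; exact hsw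
      rw [if_pos hsw]
      cases hdrop : cs.dropWhile (fun d => d != '\n') with
      | nil => simp [pvLoopA, hswt, pv_ic_singleton]
      | cons x rest =>
        have hx : x = '\n' := pv_dropWhile_head cs x rest hdrop
        subst hx
        have hic : List.intercalate ['\n'] (rest.splitOn '\n') = rest :=
          List.intercalate_splitOn rest '\n'
        obtain ⟨l2, ls2, hsp⟩ : ∃ l2 ls2, rest.splitOn '\n' = l2 :: ls2 := by
          cases h' : rest.splitOn '\n' with
          | nil => exact absurd h' (pv_splitOn_ne_nil rest)
          | cons a b => exact ⟨a, b, rfl⟩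
        have hL : pvLoopA (cs.takeWhile (fun d => d != '\n') :: l2 :: ls2)
            = pvRepl :: l2 :: ls2 := by simp [pvLoopA, hswt]
        show List.intercalate ['\n'] (pvLoopA (List.takeWhile (fun d => d != '\n') cs :: rest.splitOn '\n')) = pvRepl ++ '\n' :: rest
        rw [hsp, hL, pv_ic_cons_cons, ← hsp, hic]
    · have hswt : PySem.Chars.startswith (cs.takeWhile (fun d => d != '\n')) pvPat = false := by
        rw [pv_sw_takeWhile]; exact Bool.eq_false_iff.mpr hsw
      rw [if_neg hsw]
      cases hdrop : cs.dropWhile (fun d => d != '\n') with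
      | nil => simp [pvLoopA, hswt, pv_ic_singleton]
      | cons x rest =>
        have hx : x = '\n' := pv_dropWhile_head cs x rest hdrop
        subst hx
        have hrest : rest.length ≤ n := by
          have h1 : (cs.dropWhile (fun d => d != '\n')).length ≤ cs.length :=
            (List.dropWhile_sublist _).length_le
          rw [hdrop] at h1
          simp only [List.length_cons] at h1
          omega
        obtain ⟨l2, ls2, hsp⟩ : ∃ l2 ls2, pvLoopA (rest.splitOn '\n') = l2 :: ls2 := by
          cases h' : pvLoopA (rest.splitOn '\n') with
          | nil => exact absurd h' (pvLoopA_ne_nil _ (pv_splitOn_ne_nil rest))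
          | cons a b => exact ⟨a, b, rfl⟩
        have hL : pvLoopA (cs.takeWhile (fun d => d != '\n') :: rest.splitOn '\n')
            = cs.takeWhile (fun d => d != '\n') :: pvLoopA (rest.splitOn '\n') := by
          simp [pvLoopA, hswt]
        show List.intercalate ['\n'] (pvLoopA (List.takeWhile (fun d => d != '\n') cs :: rest.splitOn '\n')) = List.takeWhile (fun d => d != '\n') cs ++ '\n' :: pvScan true rest
        rw [hL, hsp, pv_ic_cons_cons, ← hsp, ih rest hrest]

-- ===== VERDICT (by name: the statement is the Claim_ definition above) =====
theorem mock_editor_adds_closedate_py_spec : Claim_equal_mock_editor_adds_closedate_py := by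
  intro content suffix _hdom _hpre
  unfold Spec_mock_editor_adds_closedate_py mock_editor_adds_closedate_py mock_editor_adds_closedate_py_alt
  exact congrArg String.mk (pv_main content.toList.length content.toList le_rfl)
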